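-- pv_equiv track=rewrite | github.com/PranavMishra28/offtarget-selectivity-project | conflict_resolution/conflict_resolution.py | _assess_overall_conflict_severity
-- ===== SOURCE A (Python) =====
-- from typing import List, Dict, Any, Optional, Tuple
--
-- def _assess_overall_conflict_severity(conflicts: List[Dict[str, Any]]) -> str:
--     """Assess overall conflict severity"""
--     if not conflicts:
--         return "none"
--
--     severities = [conflict["severity"] for conflict in conflicts]
--
--     if "high" in severities:
--         return "high"
--     elif "medium" in severities:
--         return "medium"
--     else:
--         return "low"
-- ===== SOURCE B (Python) =====
-- def _assess_overall_conflict_severity(conflicts):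
--     """Assess overall conflict severity via a numeric priority fold."""
--     if not conflicts:
--         return "none"
--     priority = {"high": 3, "medium": 2}
--     m = 1
--     for conflict in conflicts:
--         m = max(m, priority.get(conflict["severity"], 1))
--     return {3: "high", 2: "medium"}.get(m, "low")
-- ===== Notes on version B (the rewrite author's own statement) =====
-- stated objective: alternative
-- what changed: Replaces the severity-list construction plus two ordered membership scans with a single fold that keeps the maximum numeric priority and maps it back to a label.
import Mathlib
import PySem

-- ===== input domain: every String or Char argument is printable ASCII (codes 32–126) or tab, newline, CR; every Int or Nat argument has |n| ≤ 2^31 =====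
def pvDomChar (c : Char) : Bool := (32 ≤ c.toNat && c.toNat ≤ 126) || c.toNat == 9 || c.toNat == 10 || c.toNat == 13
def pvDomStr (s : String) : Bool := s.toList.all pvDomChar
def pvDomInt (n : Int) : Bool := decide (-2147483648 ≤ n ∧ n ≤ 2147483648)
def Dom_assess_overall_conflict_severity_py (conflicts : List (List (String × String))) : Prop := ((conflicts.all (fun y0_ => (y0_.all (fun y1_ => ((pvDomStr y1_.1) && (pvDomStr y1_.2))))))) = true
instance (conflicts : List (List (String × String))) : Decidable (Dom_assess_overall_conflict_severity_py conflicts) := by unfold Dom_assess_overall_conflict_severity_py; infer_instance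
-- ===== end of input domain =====

-- B replaces the severity list plus two ordered membership scans with one max-priority fold; same cost, different decomposition.
-- Both versions raise KeyError on a conflict without a "severity" key; Pre_ excludes those inputs.

-- dict lookup conflict["severity"] on the association list (first match)
def pvSevOf (c : List (String × String)) : String :=
  (((c.find? (fun kv => kv.1 == "severity")).map (·.2)).getD "")

-- ===== PORT A =====
def assess_overall_conflict_severity_py (conflicts : List (List (String × String))) : String :=
  if conflicts = [] then "none"
  else
    let severities := conflicts.map pvSevOf
    if severities.contains "high" then "high"
    else if severities.contains "medium" then "medium"
    else "low"

-- ===== PORT B =====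
-- priority.get(sev, 1)
def pvPrio (s : String) : Int :=
  if s = "high" then 3 else if s = "medium" then 2 else 1

def assess_overall_conflict_severity_py_alt (conflicts : List (List (String × String))) : String :=
  if conflicts = [] then "none"
  else
    let m := conflicts.foldl (fun m c => max m (pvPrio (pvSevOf c))) 1
    if m = 3 then "high" else if m = 2 then "medium" else "low"

-- ===== PRECONDITION & SPEC =====
-- Pre_ excludes inputs where some conflict lacks the "severity" key: there Python A raises KeyError.
def Pre_assess_overall_conflict_severity_py (conflicts : List (List (String × String))) : Prop :=
  ∀ c ∈ conflicts, (c.find? (fun kv => kv.1 == "severity")).isSome = true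
instance (conflicts : List (List (String × String))) : Decidable (Pre_assess_overall_conflict_severity_py conflicts) := by unfold Pre_assess_overall_conflict_severity_py; infer_instance

def pvWitness_assess_overall_conflict_severity_py : (List (List (String × String))) :=
  [[("severity", "medium")], [("severity", "low")]]

def Spec_assess_overall_conflict_severity_py (conflicts : List (List (String × String))) (out : String) : Prop := out = assess_overall_conflict_severity_py_alt conflicts
instance (conflicts : List (List (String × String))) (out : String) : Decidable (Spec_assess_overall_conflict_severity_py conflicts out) := by unfold Spec_assess_overall_conflict_severity_py; infer_instance

-- ===== CLAIM (what is proved, stated in full; the proofs are below) =====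
def Claim_equal_assess_overall_conflict_severity_py : Prop := ∀ (conflicts : List (List (String × String))), Dom_assess_overall_conflict_severity_py conflicts → Pre_assess_overall_conflict_severity_py conflicts → Spec_assess_overall_conflict_severity_py conflicts (assess_overall_conflict_severity_py conflicts)

-- ===== LEMMAS AND PROOFS =====

-- the fold computes 3 / 2 / 1 according to which severities occur
theorem pv_fold_char (l : List (List (String × String))) (a : Int) (ha : a = 1 ∨ a = 2 ∨ a = 3) :
    l.foldl (fun m c => max m (pvPrio (pvSevOf c))) a =
      if a = 3 ∨ (∃ c ∈ l, pvSevOf c = "high") then 3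
      else if a = 2 ∨ (∃ c ∈ l, pvSevOf c = "medium") then 2 else 1 := by
  induction l generalizing a with
  | nil => simp; rcases ha with h | h | h <;> simp [h]
  | cons c l ih =>
    simp only [List.foldl_cons]
    by_cases hh : pvSevOf c = "high"
    · have hp : pvPrio (pvSevOf c) = 3 := by simp [pvPrio, hh]
      rw [hp]
      have : max a 3 = 3 := by rcases ha with h | h | h <;> simp [h]
      rw [this, ih 3 (by omega)]
      simp [hh]
    · by_cases hm : pvSevOf c = "medium"
      · have hp : pvPrio (pvSevOf c) = 2 := by simp [pvPrio, hm, hh]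
        rw [hp]
        rcases ha with h | h | h
        · rw [h]; rw [show max (1:Int) 2 = 2 from rfl, ih 2 (by omega)]
          simp [hm]
        · rw [h]; rw [show max (2:Int) 2 = 2 from rfl, ih 2 (by omega)]
          simp [hm]
        · rw [h]; rw [show max (3:Int) 2 = 3 from rfl, ih 3 (by omega)]
          simp
      · have hp : pvPrio (pvSevOf c) = 1 := by simp [pvPrio, hm, hh]
        rw [hp]
        have : max a 1 = a := by rcases ha with h | h | h <;> simp [h]
        rw [this, ih a ha]
        have hne : ∀ P : Prop, (P ∨ ∃ x ∈ c :: l, pvSevOf x = "high") ↔ (P ∨ ∃ x ∈ l, pvSevOf x = "high") := by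
          intro P; constructor
          · rintro (h | ⟨x, hx, hs⟩)
            · exact Or.inl h
            · rcases List.mem_cons.mp hx with rfl | hx
              · exact absurd hs hh
              · exact Or.inr ⟨x, hx, hs⟩
          · rintro (h | ⟨x, hx, hs⟩)
            · exact Or.inl h
            · exact Or.inr ⟨x, List.mem_cons_of_mem _ hx, hs⟩
        have hne2 : ∀ P : Prop, (P ∨ ∃ x ∈ c :: l, pvSevOf x = "medium") ↔ (P ∨ ∃ x ∈ l, pvSevOf x = "medium") := by
          intro P; constructor
          · rintro (h | ⟨x, hx, hs⟩)
            · exact Or.inl h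
            · rcases List.mem_cons.mp hx with rfl | hx
              · exact absurd hs hm
              · exact Or.inr ⟨x, hx, hs⟩
          · rintro (h | ⟨x, hx, hs⟩)
            · exact Or.inl h
            · exact Or.inr ⟨x, List.mem_cons_of_mem _ hx, hs⟩
        rw [if_congr (hne _) rfl (if_congr (hne2 _) rfl rfl)]

-- ===== VERDICT (by name: the statement is the Claim_ definition above) =====
theorem assess_overall_conflict_severity_py_spec : Claim_equal_assess_overall_conflict_severity_py := by
  intro conflicts _ _
  unfold Spec_assess_overall_conflict_severity_py
  unfold assess_overall_conflict_severity_py assess_overall_conflict_severity_py_alt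
  by_cases hnil : conflicts = []
  · simp [hnil]
  · simp only [hnil, if_false]
    rw [pv_fold_char conflicts 1 (by omega)]
    have hhigh : (conflicts.map pvSevOf).contains "high" = true ↔ ∃ c ∈ conflicts, pvSevOf c = "high" := by
      simp [List.mem_map]
    have hmed : (conflicts.map pvSevOf).contains "medium" = true ↔ ∃ c ∈ conflicts, pvSevOf c = "medium" := by
      simp [List.mem_map]
    by_cases hH : ∃ c ∈ conflicts, pvSevOf c = "high"
    · simp [hH]
    · by_cases hM : ∃ c ∈ conflicts, pvSevOf c = "medium"
      · simp [hH, hM]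
      · simp [hH, hM]
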